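-- pv_equiv track=rewrite | github.com/ngwalton/AlgoCasts-fork-walton | exercises/pyramid/index.py | pyramid
-- ===== SOURCE A (Python) =====
-- from typing import List
-- from math import floor
--
-- def pyramid(n: int) -> List[str]:
--     result = []
--     width = n * 2 - 1
--     mid_point = floor(width / 2)
--
--     for row in range(n):
--         level = ""
--
--         for col in range(width):
--             left = mid_point - row
--             right = mid_point + row
--             isHash = col >= left and col <= right
--             level += "#" if isHash else " "
--
--         result.append(level)
--
--     return result
-- ===== SOURCE B (Python) =====
-- def pyramid(n):
--     rows = []
--     for row in range(n):
--         pad = n - 1 - row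
--         rows.append(' ' * pad + '#' * (2 * row + 1) + ' ' * pad)
--     return rows
-- ===== Notes on version B (the rewrite author's own statement) =====
-- stated objective: faster
-- what changed: Each row is built by one closed-form string expression (pad spaces, 2*row+1 hashes, pad spaces) instead of an inner per-column loop testing a membership condition for every column.
import Mathlib
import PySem

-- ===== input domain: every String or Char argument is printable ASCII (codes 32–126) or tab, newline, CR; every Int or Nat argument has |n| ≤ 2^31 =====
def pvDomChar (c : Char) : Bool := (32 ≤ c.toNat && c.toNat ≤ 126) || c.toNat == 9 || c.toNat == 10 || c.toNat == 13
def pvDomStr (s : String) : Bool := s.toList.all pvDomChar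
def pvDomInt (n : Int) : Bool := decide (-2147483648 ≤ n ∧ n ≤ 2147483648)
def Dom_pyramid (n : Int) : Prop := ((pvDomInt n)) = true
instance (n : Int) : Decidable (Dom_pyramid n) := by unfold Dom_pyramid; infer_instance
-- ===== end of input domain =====

-- B replaces A's inner per-column loop (membership test for every column) by one
-- closed-form row expression: pad spaces, 2*row+1 hashes, pad spaces.

-- ===== PORT A =====
-- floor(width / 2): Python float division then floor; exact as integer floor division
-- for |width| ≤ 2^32 (float arithmetic is exact there), so ported as PySem.Int.floordiv.
def pyramid (n : Int) : List String :=
  let width := n * 2 - 1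
  let midPoint := PySem.Int.floordiv width 2
  (PySem.List.pyRange 0 n 1).foldl (fun result row =>
    let level := (PySem.List.pyRange 0 width 1).foldl (fun level col =>
      let left := midPoint - row
      let right := midPoint + row
      level ++ (if left ≤ col ∧ col ≤ right then "#" else " ")) ""
    result ++ [level]) []

-- ===== PORT B =====
-- ' ' * k / '#' * k: Python string repetition (k ≤ 0 gives ""), ported by hand as
-- String.ofList (List.replicate k.toNat c) — exact, since .toNat clamps negatives to 0.
def pyramid_alt (n : Int) : List String :=
  (PySem.List.pyRange 0 n 1).foldl (fun rows row =>
    let pad := (n - 1 - row).toNat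
    rows ++ [String.ofList (List.replicate pad ' ') ++
             String.ofList (List.replicate (2 * row + 1).toNat '#') ++
             String.ofList (List.replicate pad ' ')]) []

-- ===== PRECONDITION & SPEC =====
def Spec_pyramid (n : Int) (out : List String) : Prop := out = pyramid_alt n
instance (n : Int) (out : List String) : Decidable (Spec_pyramid n out) := by unfold Spec_pyramid; infer_instance

-- ===== CLAIM (what is proved, stated in full; the proofs are below) =====
def Claim_equal_pyramid : Prop := ∀ (n : Int), Dom_pyramid n → Spec_pyramid n (pyramid n)

-- ===== LEMMAS AND PROOFS =====

-- A string-building foldl appends, on the character level, the flatMap of the pieces.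
theorem foldl_str_toList (l : List Int) (g : Int → String) (s : String) :
    (l.foldl (fun lev col => lev ++ g col) s).toList
      = s.toList ++ l.flatMap (fun col => (g col).toList) := by
  induction l generalizing s with
  | nil => simp
  | cons x xs ih => simp [List.foldl_cons, ih]

-- the midpoint computed by A
theorem mid_eq (n : Int) (_hn : 1 ≤ n) : PySem.Int.floordiv (n * 2 - 1) 2 = n - 1 := by
  rw [PySem.Int.floordiv_eq_iff_of_pos (by omega)]
  omega

-- a range map that is constant on its members is a replicate
theorem map_const_replicate (a b : Int) (f : Int → Char) (c : Char)
    (h : ∀ x, a ≤ x → x < b → f x = c) :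
    (PySem.List.pyRange a b 1).map f = List.replicate (b - a).toNat c := by
  rw [List.eq_replicate_iff]
  constructor
  · simp [PySem.List.length_pyRange_one]
  · intro y hy
    simp only [List.mem_map] at hy
    obtain ⟨x, hx, rfl⟩ := hy
    rw [PySem.List.mem_pyRange_one] at hx
    exact h x hx.1 hx.2

-- the characters of one of A's rows
theorem row_chars (n row : Int) (h0 : 0 ≤ row) (h1 : row < n) :
    (PySem.List.pyRange 0 (n * 2 - 1) 1).map
        (fun col => if n - 1 - row ≤ col ∧ col ≤ n - 1 + row then '#' else ' ')
      = List.replicate (n - 1 - row).toNat ' ' ++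
        List.replicate (2 * row + 1).toNat '#' ++
        List.replicate (n - 1 - row).toNat ' ' := by
  rw [PySem.List.pyRange_one_append 0 (n - 1 - row) (n * 2 - 1) (by omega) (by omega),
      PySem.List.pyRange_one_append (n - 1 - row) (n - 1 + row + 1) (n * 2 - 1)
        (by omega) (by omega)]
  simp only [List.map_append]
  rw [map_const_replicate _ _ _ ' ' (by intro x hx1 hx2; simp; omega),
      map_const_replicate _ _ _ '#' (by intro x hx1 hx2; simp; omega),
      map_const_replicate _ _ _ ' ' (by intro x hx1 hx2; simp; omega)]
  have e1 : (n - 1 - row - 0).toNat = (n - 1 - row).toNat := by omega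
  have e2 : (n - 1 + row + 1 - (n - 1 - row)).toNat = (2 * row + 1).toNat := by omega
  have e3 : (n * 2 - 1 - (n - 1 + row + 1)).toNat = (n - 1 - row).toNat := by omega
  rw [e1, e2, e3, List.append_assoc]

-- ===== VERDICT (by name: the statement is the Claim_ definition above) =====
theorem pyramid_spec : Claim_equal_pyramid := by
  intro n _
  unfold Spec_pyramid pyramid pyramid_alt
  simp only []
  rw [PySem.List.foldl_append_singleton_eq_map, PySem.List.foldl_append_singleton_eq_map]
  simp only [List.nil_append]
  apply List.map_congr_left
  intro row hrow
  rw [PySem.List.mem_pyRange_one] at hrow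
  have hn : 1 ≤ n := by omega
  apply String.toList_inj.mp
  rw [foldl_str_toList]
  have hpiece : ∀ col : Int,
      ((if PySem.Int.floordiv (n * 2 - 1) 2 - row ≤ col ∧
           col ≤ PySem.Int.floordiv (n * 2 - 1) 2 + row then ("#" : String) else " ")).toList
        = [if n - 1 - row ≤ col ∧ col ≤ n - 1 + row then '#' else ' '] := by
    intro col
    rw [mid_eq n hn]
    split_ifs <;> simp_all
  simp only [hpiece]
  rw [← List.map_eq_flatMap, row_chars n row hrow.1 hrow.2]
  simp
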